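-- pv_equiv track=rewrite | github.com/fangyixin0215/py_test | mac_product/mac_product_test.py | generate_exact_mac_addresses
-- ===== SOURCE A (Python) =====
-- def generate_exact_mac_addresses(count, prefix="34:BB:11"):
--     """
--     精确生成指定数量的MAC地址，并将它们作为生成器返回。
--
--     :param count: 要生成的MAC地址精确数量
--     :param prefix: MAC地址的前缀，默认为"34:A3:11"
--     :return: 生成MAC地址<生成器>
--     """
--     byte1, byte2, byte3 = 0, 0, 0
--     while count > 0:
--         mac_address = f"{prefix}:{byte1:02X}:{byte2:02X}:{byte3:02X}"
--         yield mac_address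
--         byte3 = (byte3 + 1) % 256  # 第三个字节循环
--         if byte3 == 0:
--             byte2 = (byte2 + 1) % 256  # 第二个字节循环
--             if byte2 == 0:
--                 byte1 = (byte1 + 1) % 256  # 第一个字节循环
--         count -= 1
-- ===== SOURCE B (Python) =====
-- def generate_exact_mac_addresses(count, prefix="34:BB:11"):
--     """Formats the whole 24-bit counter value at once as six hex digits and
--     splices colon-separated pairs out of it, instead of maintaining three
--     separate byte counters with carry propagation."""
--     for i in range(count):
--         h = format(i % 0x1000000, '06X')
--         yield f"{prefix}:{h[0:2]}:{h[2:4]}:{h[4:6]}"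
-- ===== Notes on version B (the rewrite author's own statement) =====
-- stated objective: simpler
-- what changed: Replaces A's mutable three-byte counter with carry-propagation branches by formatting the whole 24-bit value i % 2**24 as one six-digit hex string per index and slicing it into colon-separated pairs.
import Mathlib
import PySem

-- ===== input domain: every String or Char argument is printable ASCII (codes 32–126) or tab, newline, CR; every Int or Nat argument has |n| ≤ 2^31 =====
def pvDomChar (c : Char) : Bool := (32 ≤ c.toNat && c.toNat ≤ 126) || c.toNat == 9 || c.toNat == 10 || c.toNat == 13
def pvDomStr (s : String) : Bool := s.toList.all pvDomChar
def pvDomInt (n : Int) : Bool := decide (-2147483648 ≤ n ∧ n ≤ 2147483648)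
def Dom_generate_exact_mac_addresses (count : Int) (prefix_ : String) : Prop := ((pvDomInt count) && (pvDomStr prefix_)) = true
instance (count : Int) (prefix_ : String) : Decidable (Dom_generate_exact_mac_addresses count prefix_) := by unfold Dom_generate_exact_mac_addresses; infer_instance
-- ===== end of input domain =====

-- B formats the whole 24-bit counter value i % 2^24 as one six-digit hex string and splices
-- colon-separated pairs out of it, replacing A's stateful carry-propagating byte counter; objective: simpler.


-- ===== PORT A =====
-- f"{b:02X}" ported by hand via a digit table: exact for 0 ≤ b < 256, the only values A formats
def pvHex2 (b : Int) : String :=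
  String.ofList [['0','1','2','3','4','5','6','7','8','9','A','B','C','D','E','F'].getD (PySem.Int.floordiv b 16).toNat '0',
             ['0','1','2','3','4','5','6','7','8','9','A','B','C','D','E','F'].getD (PySem.Int.mod b 16).toNat '0']

-- A's f-string f"{prefix}:{b1:02X}:{b2:02X}:{b3:02X}"
def pvMacA (prefix_ : String) (b1 b2 b3 : Int) : String :=
  prefix_ ++ ":" ++ pvHex2 b1 ++ ":" ++ pvHex2 b2 ++ ":" ++ pvHex2 b3

-- A's while-loop: the generator's yielded values collected in order
def pvGenA (count : Int) (prefix_ : String) (b1 b2 b3 : Int) : List String :=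
  if count > 0 then
    pvMacA prefix_ b1 b2 b3 ::
      (if PySem.Int.mod (b3 + 1) 256 = 0 then
         (if PySem.Int.mod (b2 + 1) 256 = 0 then
            pvGenA (count - 1) prefix_ (PySem.Int.mod (b1 + 1) 256) (PySem.Int.mod (b2 + 1) 256) (PySem.Int.mod (b3 + 1) 256)
          else pvGenA (count - 1) prefix_ b1 (PySem.Int.mod (b2 + 1) 256) (PySem.Int.mod (b3 + 1) 256))
       else pvGenA (count - 1) prefix_ b1 b2 (PySem.Int.mod (b3 + 1) 256))
  else []
termination_by count.toNat
decreasing_by all_goals omega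

def generate_exact_mac_addresses (count : Int) (prefix_ : String) : List String :=
  pvGenA count prefix_ 0 0 0

-- ===== PORT B =====
-- one hex digit character, computed arithmetically from the nibble value (exact for 0 ≤ d < 16)
def pvNibble (d : Int) : Char := Char.ofNat (if d < 10 then (48 + d).toNat else (55 + d).toNat)

-- format(m, '06X') ported by hand: the six nibbles of m, most significant first; exact for 0 ≤ m < 2^24
def pvHex6 (m : Int) : List Char :=
  [pvNibble (m / 1048576 % 16), pvNibble (m / 65536 % 16), pvNibble (m / 4096 % 16),
   pvNibble (m / 256 % 16), pvNibble (m / 16 % 16), pvNibble (m % 16)]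

-- B's f-string: h = format(i % 0x1000000, '06X'); f"{prefix}:{h[0:2]}:{h[2:4]}:{h[4:6]}"
def pvMacB (prefix_ : String) (i : Int) : String :=
  let h := pvHex6 (PySem.Int.mod i 16777216)
  prefix_ ++ ":" ++ String.ofList (h.take 2) ++ ":" ++ String.ofList ((h.drop 2).take 2)
          ++ ":" ++ String.ofList (h.drop 4)

def generate_exact_mac_addresses_alt (count : Int) (prefix_ : String) : List String :=
  (PySem.List.pyRange 0 count 1).map (pvMacB prefix_)

-- ===== PRECONDITION & SPEC =====
def Spec_generate_exact_mac_addresses (count : Int) (prefix_ : String) (out : List String) : Prop := out = generate_exact_mac_addresses_alt count prefix_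
instance (count : Int) (prefix_ : String) (out : List String) : Decidable (Spec_generate_exact_mac_addresses count prefix_ out) := by unfold Spec_generate_exact_mac_addresses; infer_instance

-- ===== CLAIM (what is proved, stated in full; the proofs are below) =====
def Claim_equal_generate_exact_mac_addresses : Prop := ∀ (count : Int) (prefix_ : String), Dom_generate_exact_mac_addresses count prefix_ → Spec_generate_exact_mac_addresses count prefix_ (generate_exact_mac_addresses count prefix_)

-- ===== LEMMAS AND PROOFS =====

-- the digit table and the arithmetic nibble character agree on 0..15
lemma table_eq_nibble (d : Int) (h0 : 0 ≤ d) (h16 : d < 16) :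
    ['0','1','2','3','4','5','6','7','8','9','A','B','C','D','E','F'].getD d.toNat '0' = pvNibble d := by
  interval_cases d <;> decide

-- A's two-digit formatter equals two arithmetic nibble characters
lemma hex2_eq (b : Int) (h0 : 0 ≤ b) (h : b < 256) :
    pvHex2 b = String.ofList [pvNibble (b / 16), pvNibble (b % 16)] := by
  unfold pvHex2
  rw [PySem.Int.floordiv_eq_ediv_of_pos (by norm_num), PySem.Int.mod_eq_emod_of_pos (by norm_num),
      table_eq_nibble _ (by omega) (by omega), table_eq_nibble _ (by omega) (by omega)]

-- per index i ≥ 0, A's byte-wise address equals B's sliced six-digit format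
lemma mac_eq (prefix_ : String) (i : Int) (_hi : 0 ≤ i) :
    pvMacA prefix_ (PySem.Int.mod (PySem.Int.floordiv i 65536) 256)
                   (PySem.Int.mod (PySem.Int.floordiv i 256) 256)
                   (PySem.Int.mod i 256)
      = pvMacB prefix_ i := by
  have hm256 : ∀ a : Int, PySem.Int.mod a 256 = a % 256 :=
    fun a => PySem.Int.mod_eq_emod_of_pos (by norm_num)
  have hd : ∀ a : Int, PySem.Int.floordiv a 256 = a / 256 :=
    fun a => PySem.Int.floordiv_eq_ediv_of_pos (by norm_num)
  have hd6 : ∀ a : Int, PySem.Int.floordiv a 65536 = a / 65536 :=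
    fun a => PySem.Int.floordiv_eq_ediv_of_pos (by norm_num)
  unfold pvMacA pvMacB pvHex6
  simp only [hm256, hd, hd6, PySem.Int.mod_eq_emod_of_pos (show (0:Int) < 16777216 by norm_num),
             List.take, List.drop]
  rw [hex2_eq _ (by omega) (by omega), hex2_eq _ (by omega) (by omega),
      hex2_eq _ (by omega) (by omega)]
  rw [show i / 65536 % 256 / 16 = i % 16777216 / 1048576 % 16 by omega,
      show i / 65536 % 256 % 16 = i % 16777216 / 65536 % 16 by omega,
      show i / 256 % 256 / 16 = i % 16777216 / 4096 % 16 by omega,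
      show i / 256 % 256 % 16 = i % 16777216 / 256 % 16 by omega,
      show i % 256 / 16 = i % 16777216 / 16 % 16 by omega,
      show i % 256 % 16 = i % 16777216 % 16 by omega]

-- loop invariant: from the byte state encoding index m, A's loop produces exactly the
-- closed-form addresses for indices m, m+1, …, m+c-1
lemma pvGenA_eq (prefix_ : String) : ∀ (k : Nat) (c m : Int), c ≤ (k : Int) → 0 ≤ m →
    pvGenA c prefix_ (PySem.Int.mod (PySem.Int.floordiv m 65536) 256)
                     (PySem.Int.mod (PySem.Int.floordiv m 256) 256)
                     (PySem.Int.mod m 256)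
      = (PySem.List.pyRange m (m + c) 1).map (fun i =>
          pvMacA prefix_ (PySem.Int.mod (PySem.Int.floordiv i 65536) 256)
                         (PySem.Int.mod (PySem.Int.floordiv i 256) 256)
                         (PySem.Int.mod i 256)) := by
  intro k
  induction k with
  | zero =>
    intro c m hc hm
    rw [pvGenA, if_neg (by omega), PySem.List.pyRange_one_eq_nil (by omega)]
    simp
  | succ k ih =>
    intro c m hc hm
    by_cases hpos : c > 0
    · rw [pvGenA, if_pos hpos, PySem.List.pyRange_one_cons (by omega), List.map_cons]
      have hm256 : ∀ a : Int, PySem.Int.mod a 256 = a % 256 :=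
        fun a => PySem.Int.mod_eq_emod_of_pos (by norm_num)
      have hd256 : ∀ a : Int, PySem.Int.floordiv a 256 = a / 256 :=
        fun a => PySem.Int.floordiv_eq_ediv_of_pos (by norm_num)
      have hd65536 : ∀ a : Int, PySem.Int.floordiv a 65536 = a / 65536 :=
        fun a => PySem.Int.floordiv_eq_ediv_of_pos (by norm_num)
      have hrec := ih (c - 1) (m + 1) (by omega) (by omega)
      rw [show m + 1 + (c - 1) = m + c by ring] at hrec
      simp only [hm256, hd256, hd65536] at hrec ⊢
      split_ifs with h3 h2
      · congr 1
        rw [show ((m / 65536) % 256 + 1) % 256 = ((m + 1) / 65536) % 256 by omega,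
            show ((m / 256) % 256 + 1) % 256 = ((m + 1) / 256) % 256 by omega,
            show (m % 256 + 1) % 256 = (m + 1) % 256 by omega]
        exact hrec
      · congr 1
        rw [show (m / 65536) % 256 = ((m + 1) / 65536) % 256 by omega,
            show ((m / 256) % 256 + 1) % 256 = ((m + 1) / 256) % 256 by omega,
            show (m % 256 + 1) % 256 = (m + 1) % 256 by omega]
        exact hrec
      · congr 1
        rw [show (m / 65536) % 256 = ((m + 1) / 65536) % 256 by omega,
            show (m / 256) % 256 = ((m + 1) / 256) % 256 by omega,
            show (m % 256 + 1) % 256 = (m + 1) % 256 by omega]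
        exact hrec
    · rw [pvGenA, if_neg hpos, PySem.List.pyRange_one_eq_nil (by omega)]
      simp

-- ===== VERDICT (by name: the statement is the Claim_ definition above) =====
theorem generate_exact_mac_addresses_spec : Claim_equal_generate_exact_mac_addresses := by
  intro count prefix_ _
  unfold Spec_generate_exact_mac_addresses generate_exact_mac_addresses generate_exact_mac_addresses_alt
  have h := pvGenA_eq prefix_ count.toNat count 0 (by omega) le_rfl
  simp only [zero_add, show PySem.Int.floordiv 0 65536 = 0 from by decide,
             show PySem.Int.floordiv 0 256 = 0 from by decide,
             show PySem.Int.mod 0 256 = 0 from by decide] at h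
  rw [h]
  exact List.map_congr_left (fun i hi => mac_eq prefix_ i ((PySem.List.mem_pyRange_one).mp hi).1)
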